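-- pv_equiv track=rewrite | github.com/pypi-data/pypi-mirror-360 | packages/hetu-pysdk/hetu_pysdk-0.1.0.tar.gz/hetu_pysdk-0.1.0/hetu/utils/mock/hetutensor_mock.py | _get_most_recent_storage
-- ===== SOURCE A (Python) =====
-- from typing import Any, Optional, Union, TypedDict
--
-- BlockNumber = int
--
-- def _get_most_recent_storage(
--     storage: dict[BlockNumber, Any], block_number: Optional[int] = None
-- ) -> Any:
--     if block_number is None:
--         items = list(storage.items())
--         items.sort(key=lambda x: x[0], reverse=True)
--         if len(items) == 0:
--             return None
--
--         return items[0][1]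
--
--     else:
--         while block_number >= 0:
--             if block_number in storage:
--                 return storage[block_number]
--
--             block_number -= 1
--
--         return None
-- ===== SOURCE B (Python) =====
-- def _get_most_recent_storage(storage, block_number=None):
--     if block_number is None:
--         candidates = list(storage)
--     else:
--         candidates = [k for k in storage if 0 <= k <= block_number]
--     if not candidates:
--         return None
--     return storage[max(candidates)]
-- ===== Notes on version B (the rewrite author's own statement) =====
-- stated objective: simpler
-- what changed: Replaces A's descending integer-by-integer probe loop (and the full reverse sort in the None branch) with one selection over the dict's own keys: pick the maximum admissible key and look it up.
import Mathlib
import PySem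

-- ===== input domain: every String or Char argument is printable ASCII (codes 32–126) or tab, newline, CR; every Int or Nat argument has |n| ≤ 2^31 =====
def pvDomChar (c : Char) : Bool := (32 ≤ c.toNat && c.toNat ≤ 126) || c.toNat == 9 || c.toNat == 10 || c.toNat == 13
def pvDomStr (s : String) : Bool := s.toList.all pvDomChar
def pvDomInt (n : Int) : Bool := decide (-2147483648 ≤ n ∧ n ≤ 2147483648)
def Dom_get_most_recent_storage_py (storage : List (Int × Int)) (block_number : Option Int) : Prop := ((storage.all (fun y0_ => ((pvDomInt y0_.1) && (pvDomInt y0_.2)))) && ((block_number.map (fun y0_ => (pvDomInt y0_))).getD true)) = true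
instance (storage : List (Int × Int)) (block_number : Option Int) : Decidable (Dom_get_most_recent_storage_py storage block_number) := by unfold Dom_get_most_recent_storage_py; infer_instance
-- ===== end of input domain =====

-- B replaces A's descending integer probe loop / reverse sort by one maximum-key selection over the
-- dict's own keys (objective: simpler; the claim is about the return value, neither version mutates).

-- ===== PORT A =====
-- `block_number in storage` / `storage[block_number]`: dict membership + access = first-match lookup
-- on the association list (exact for dicts, whose keys are unique).
-- the `while block_number >= 0` loop, stepping block_number down by 1:
def pvProbeDown (storage : List (Int × Int)) (bn : Int) : Option Int :=
  if _h : 0 ≤ bn then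
    match List.lookup bn storage with
    | some v => some v
    | none => pvProbeDown storage (bn - 1)
  else none
termination_by (bn + 1).toNat
decreasing_by omega

def get_most_recent_storage_py (storage : List (Int × Int)) (block_number : Option Int) : Option Int :=
  match block_number with
  | none =>
    -- items.sort(key=lambda x: x[0], reverse=True); return items[0][1] if any
    match PySem.List.sorted storage (fun x => x.1) true with
    | [] => none
    | p :: _ => some p.2
  | some bn => pvProbeDown storage bn

-- ===== PORT B =====
def get_most_recent_storage_py_alt (storage : List (Int × Int)) (block_number : Option Int) : Option Int :=
  let candidates :=
    match block_number with
    | none => storage.map (fun p => p.1)                           -- list(storage) = the keys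
    | some bn => (storage.map (fun p => p.1)).filter (fun k => decide (0 ≤ k) && decide (k ≤ bn))
  match PySem.List.max? candidates (fun k => k) with               -- max(candidates), none if empty
  | none => none
  | some m => List.lookup m storage                                -- storage[m]

-- ===== PRECONDITION & SPEC =====
def Spec_get_most_recent_storage_py (storage : List (Int × Int)) (block_number : Option Int) (out : Option Int) : Prop := out = get_most_recent_storage_py_alt storage block_number
instance (storage : List (Int × Int)) (block_number : Option Int) (out : Option Int) : Decidable (Spec_get_most_recent_storage_py storage block_number out) := by unfold Spec_get_most_recent_storage_py; infer_instance

-- ===== CLAIM (what is proved, stated in full; the proofs are below) =====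
def Claim_equal_get_most_recent_storage_py : Prop := ∀ (storage : List (Int × Int)) (block_number : Option Int), Dom_get_most_recent_storage_py storage block_number → Spec_get_most_recent_storage_py storage block_number (get_most_recent_storage_py storage block_number)

-- ===== LEMMAS AND PROOFS =====

theorem pv_foldl_ext {α β : Type} (f g : β → α → β) (h : ∀ a b, f a b = g a b) :
    ∀ (xs : List α) (acc : β), List.foldl f acc xs = List.foldl g acc xs := by
  intro xs
  induction xs with
  | nil => intro acc; rfl
  | cons x t ih => intro acc; simp only [List.foldl, h]; exact ih _

-- the step function of PySem.List.max? with key = Prod.fst on pairs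
def pvStep (acc : Option (Int × Int)) (x : Int × Int) : Option (Int × Int) :=
  match acc with
  | none => some x
  | some m => if m.1 < x.1 then some x else some m

-- the step function of PySem.List.max? with key = id on Int
def pvStepK (acc : Option Int) (x : Int) : Option Int :=
  match acc with
  | none => some x
  | some m => if m < x then some x else some m

theorem pvMaxP_eq (xs : List (Int × Int)) :
    PySem.List.max? xs (fun p => p.1) = xs.foldl pvStep none := by
  simp only [PySem.List.max?]
  exact pv_foldl_ext _ pvStep (fun a b => by cases a <;> rfl) xs none

theorem pvMaxK_eq (l : List Int) :
    PySem.List.max? l (fun k => k) = l.foldl pvStepK none := by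
  simp only [PySem.List.max?]
  exact pv_foldl_ext _ pvStepK (fun a b => by cases a <;> rfl) l none

-- lookup helpers
theorem pv_lookup_some_mem {xs : List (Int × Int)} {k v : Int}
    (h : List.lookup k xs = some v) : k ∈ xs.map Prod.fst := by
  induction xs with
  | nil => simp [List.lookup] at h
  | cons p t ih =>
    by_cases hk : k = p.1
    · simp [hk]
    · simp only [List.lookup, show (k == p.1) = false by simpa using hk] at h
      simpa using Or.inr (by simpa using ih h)

theorem pv_lookup_none_not_mem {xs : List (Int × Int)} {k : Int}
    (h : List.lookup k xs = none) : k ∉ xs.map Prod.fst := by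
  induction xs with
  | nil => simp
  | cons q t ih =>
    by_cases hq : k = q.1
    · simp [List.lookup, hq] at h
    · simp only [List.lookup, show (k == q.1) = false by simpa using hq] at h
      simpa [hq] using ih h

-- keys never decrease along the max?-fold
theorem pv_foldl_grow (xs : List (Int × Int)) :
    ∀ (c m : Int × Int), xs.foldl pvStep (some c) = some m → c = m ∨ c.1 < m.1 := by
  induction xs with
  | nil => intro c m h; simp at h; exact Or.inl h
  | cons x t ih =>
    intro c m h
    simp only [List.foldl, pvStep] at h
    by_cases hx : c.1 < x.1
    · rw [if_pos hx] at h
      rcases ih x m h with rfl | hlt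
      · exact Or.inr hx
      · exact Or.inr (lt_trans hx hlt)
    · rw [if_neg hx] at h
      exact ih c m h

-- stability: the pair the fold keeps is the FIRST pair with its key
theorem pv_foldl_lookup (xs : List (Int × Int)) :
    ∀ (c m : Int × Int), xs.foldl pvStep (some c) = some m →
      List.lookup m.1 (c :: xs) = some m.2 := by
  induction xs with
  | nil =>
    intro c m h; simp at h; subst h; simp [List.lookup]
  | cons x t ih =>
    intro c m h
    simp only [List.foldl, pvStep] at h
    by_cases hx : c.1 < x.1
    · rw [if_pos hx] at h
      have hgrow : x = m ∨ x.1 < m.1 := pv_foldl_grow t x m h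
      have hcm : (m.1 == c.1) = false := by
        simp only [beq_eq_false_iff_ne, ne_eq]
        rcases hgrow with rfl | hlt <;> omega
      have hrec := ih x m h
      simp only [List.lookup, hcm]
      simpa [List.lookup] using hrec
    · rw [if_neg hx] at h
      rcases pv_foldl_grow t c m h with rfl | hlt
      · simp [List.lookup]
      · have hcm : (m.1 == c.1) = false := by
          simp only [beq_eq_false_iff_ne, ne_eq]; omega
        have hxm : (m.1 == x.1) = false := by
          simp only [beq_eq_false_iff_ne, ne_eq]; omega
        have hrec := ih c m h
        simp only [List.lookup, hcm] at hrec
        simp only [List.lookup, hcm, hxm]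
        exact hrec

-- head of the stable reverse sort = the max?-fold over the pairs
theorem pv_head_insertBy (x : Int × Int) (acc : List (Int × Int)) :
    (PySem.List.insertBy (fun a b : Int × Int => decide (b.1 < a.1)) x acc).head? =
      pvStep acc.head? x := by
  cases acc with
  | nil => simp [PySem.List.insertBy, pvStep]
  | cons y ys =>
    by_cases h : y.1 < x.1
    · simp [PySem.List.insertBy, pvStep, h]
    · simp [PySem.List.insertBy, pvStep, h]

theorem pv_head_foldl (xs : List (Int × Int)) :
    ∀ (acc : List (Int × Int)),
      (xs.foldl (fun a x => PySem.List.insertBy (fun a b : Int × Int => decide (b.1 < a.1)) x a) acc).head? =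
        xs.foldl pvStep acc.head? := by
  induction xs with
  | nil => intro acc; rfl
  | cons x t ih =>
    intro acc
    simp only [List.foldl]
    rw [ih, pv_head_insertBy]

theorem pv_head_sorted (xs : List (Int × Int)) :
    (PySem.List.sorted xs (fun p => p.1) true).head? = PySem.List.max? xs (fun p => p.1) := by
  rw [PySem.List.sorted_rev_eq_foldl_insertBy, pvMaxP_eq, pv_head_foldl]
  rfl

-- max over the keys = key of the pair the pair-fold keeps
theorem pv_foldl_keys (xs : List (Int × Int)) :
    ∀ (acc : Option (Int × Int)),
      (xs.map (fun p => p.1)).foldl pvStepK (Option.map Prod.fst acc) =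
        Option.map Prod.fst (xs.foldl pvStep acc) := by
  induction xs with
  | nil => intro acc; rfl
  | cons x t ih =>
    intro acc
    simp only [List.map, List.foldl]
    rw [show pvStepK (Option.map Prod.fst acc) x.1 = Option.map Prod.fst (pvStep acc x) by
      cases acc with
      | none => rfl
      | some m => by_cases h : m.1 < x.1 <;> simp [pvStepK, pvStep, h]]
    exact ih (pvStep acc x)

theorem pv_max_keys (xs : List (Int × Int)) :
    PySem.List.max? (xs.map (fun p => p.1)) (fun k => k) =
      Option.map Prod.fst (PySem.List.max? xs (fun p => p.1)) := by
  rw [pvMaxK_eq, pvMaxP_eq]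
  simpa using pv_foldl_keys xs none

-- if x is a member and an upper bound, max? (key = id) returns x
theorem pv_max_of_bound {l : List Int} {x : Int}
    (hmem : x ∈ l) (hub : ∀ y ∈ l, y ≤ x) :
    PySem.List.max? l (fun k => k) = some x := by
  cases hmax : PySem.List.max? l (fun k => k) with
  | none => rw [PySem.List.max?_eq_none_iff] at hmax; simp [hmax] at hmem
  | some m =>
    have h1 : x ≤ m := PySem.List.max?_isMax hmax x hmem
    have h2 : m ≤ x := hub m (PySem.List.max?_mem hmax)
    have : m = x := le_antisymm h2 h1
    rw [this]

-- B's else-branch body as a function of bn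
def pvBelse (storage : List (Int × Int)) (bn : Int) : Option Int :=
  match PySem.List.max? ((storage.map (fun p => p.1)).filter (fun k => decide (0 ≤ k) && decide (k ≤ bn))) (fun k => k) with
  | none => none
  | some m => List.lookup m storage

theorem pv_probe_eq_belse (storage : List (Int × Int)) (bn : Int) :
    pvProbeDown storage bn = pvBelse storage bn := by
  fun_induction pvProbeDown storage bn with
  | case1 bn h v hv =>
    -- block_number found in storage
    have hbn : bn ∈ storage.map Prod.fst := pv_lookup_some_mem hv
    have hmem : bn ∈ (storage.map (fun p => p.1)).filter (fun k => decide (0 ≤ k) && decide (k ≤ bn)) := by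
      refine List.mem_filter.2 ⟨hbn, ?_⟩; simp; omega
    have hub : ∀ y ∈ (storage.map (fun p => p.1)).filter (fun k => decide (0 ≤ k) && decide (k ≤ bn)), y ≤ bn := by
      intro y hy
      have := (List.mem_filter.1 hy).2
      simp at this; omega
    simp [pvBelse, pv_max_of_bound hmem hub, hv]
  | case2 bn h hnone ih =>
    -- not present: the candidate set at bn equals the one at bn-1
    have hnot : bn ∉ storage.map Prod.fst := pv_lookup_none_not_mem hnone
    have hfilter :
        (storage.map (fun p => p.1)).filter (fun k => decide (0 ≤ k) && decide (k ≤ bn)) =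
        (storage.map (fun p => p.1)).filter (fun k => decide (0 ≤ k) && decide (k ≤ bn - 1)) := by
      apply List.filter_congr
      intro k hk
      have hne : k ≠ bn := fun he => hnot (he ▸ hk)
      have hiff : (k ≤ bn) ↔ (k ≤ bn - 1) := by omega
      simp [hiff]
    rw [ih]
    unfold pvBelse
    rw [hfilter]
  | case3 bn h =>
    -- bn < 0: no candidate is admissible
    have hfilter :
        (storage.map (fun p => p.1)).filter (fun k => decide (0 ≤ k) && decide (k ≤ bn)) = [] := by
      apply List.filter_eq_nil_iff.2
      intro k _
      simp; omega
    simp [pvBelse, hfilter, PySem.List.max?]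

-- ===== VERDICT (by name: the statement is the Claim_ definition above) =====
theorem get_most_recent_storage_py_spec : Claim_equal_get_most_recent_storage_py := by
  intro storage block_number _
  unfold Spec_get_most_recent_storage_py
  cases block_number with
  | none =>
    show (match PySem.List.sorted storage (fun x => x.1) true with
          | [] => none
          | p :: _ => some p.2) = _
    cases hsorted : PySem.List.sorted storage (fun x => x.1) true with
    | nil =>
      have hxs : storage = [] := (PySem.List.sorted_eq_nil_iff _ _ _).1 hsorted
      subst hxs
      rfl
    | cons p rest =>
      have hhead : PySem.List.max? storage (fun q => q.1) = some p := by
        rw [← pv_head_sorted, hsorted]; rfl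
      have hlookup : List.lookup p.1 storage = some p.2 := by
        cases storage with
        | nil => simp [PySem.List.max?] at hhead
        | cons c t =>
          have : t.foldl pvStep (some c) = some p := by
            rw [pvMaxP_eq] at hhead
            simpa [List.foldl, pvStep] using hhead
          exact pv_foldl_lookup t c p this
      simp [get_most_recent_storage_py_alt, pv_max_keys, hhead, hlookup]
  | some bn =>
    show pvProbeDown storage bn = _
    rw [pv_probe_eq_belse]
    rfl
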